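-- pv_equiv track=rewrite | github.com/yehorn0/algo20242025_2 | l4/src/lab2.py | weights_equilibrium
-- ===== SOURCE A (Python) =====
-- def weights_equilibrium(weights: list[int]) -> int:
--     for current_idx in range(len(weights)):
--         # ========= 1st implementation =========
--         # left = right = 0
--         # for idx in range(len(weights[:current_idx])):
--         #     left += (current_idx - idx) * weights[idx]
--         #
--         # for idx in range(len(weights[current_idx + 1:])):
--         #     right += (idx + 1) * weights[current_idx + idx + 1]
--
--         # ========= 2nd implementation =========
--         # left = right = 0
--         # for idx, weight in enumerate(weights[:current_idx]):
--         #     left += (current_idx - idx) * weight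
--         #
--         # for idx, weight in enumerate(weights[current_idx + 1:]):
--         #     right += (idx + 1) * weight
--
--         # ========= 3rd implementation =========
--         left = sum(
--             (current_idx - idx) * weight for idx, weight in enumerate(weights[:current_idx])
--         )
--
--         right = sum(
--             (idx + 1) * weight for idx, weight in enumerate(weights[current_idx + 1:])
--         )
--
--         if left == right:
--             return current_idx
--
--     return -1
-- ===== SOURCE B (Python) =====
-- def weights_equilibrium(weights: list[int]) -> int:
--     total = sum(weights)
--     left = 0
--     right = sum(idx * weight for idx, weight in enumerate(weights))
--     prefix = 0
--     for i, w in enumerate(weights):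
--         if left == right:
--             return i
--         prefix += w
--         left += prefix
--         right -= total - prefix
--     return -1
-- ===== Notes on version B (the rewrite author's own statement) =====
-- stated objective: faster
-- what changed: Replaces A's per-pivot recomputation of both distance-weighted sums over list slices by a single pass that maintains the left and right torques incrementally (left += running prefix sum, right -= running suffix sum) as the pivot advances.
import Mathlib
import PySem

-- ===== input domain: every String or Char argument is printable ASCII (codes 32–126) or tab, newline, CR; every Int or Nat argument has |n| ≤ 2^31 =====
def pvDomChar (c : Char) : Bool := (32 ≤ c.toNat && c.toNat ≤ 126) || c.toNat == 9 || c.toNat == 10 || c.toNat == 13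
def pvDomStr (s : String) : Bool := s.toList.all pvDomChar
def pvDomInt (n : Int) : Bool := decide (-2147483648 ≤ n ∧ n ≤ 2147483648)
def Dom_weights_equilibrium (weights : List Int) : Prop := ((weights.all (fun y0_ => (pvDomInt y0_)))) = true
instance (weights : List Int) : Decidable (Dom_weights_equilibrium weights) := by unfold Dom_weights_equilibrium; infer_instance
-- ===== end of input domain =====

-- B replaces A's per-pivot O(n) slice sums by one pass updating both torques incrementally
-- from prefix sums (objective: faster, asymptotic O(n^2) → O(n)). Return values agree on all inputs.

-- ===== PORT A =====
-- left = sum((current_idx - idx) * weight for idx, weight in enumerate(weights[:current_idx]))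
def pvA_left (weights : List Int) (i : Int) : Int :=
  ((PySem.List.enumerate (PySem.List.slice weights none (some i))).map
    (fun q => (i - q.1) * q.2)).sum

-- right = sum((idx + 1) * weight for idx, weight in enumerate(weights[current_idx + 1:]))
def pvA_right (weights : List Int) (i : Int) : Int :=
  ((PySem.List.enumerate (PySem.List.slice weights (some (i + 1)) none)).map
    (fun q => (q.1 + 1) * q.2)).sum

-- for current_idx in range(len(weights)): … ; return -1
def pvA_go (weights : List Int) : List Int → Int
  | [] => -1
  | i :: rest => if pvA_left weights i = pvA_right weights i then i else pvA_go weights rest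

def weights_equilibrium (weights : List Int) : Int :=
  pvA_go weights (PySem.List.pyRange 0 (weights.length : Int) 1)

-- ===== PORT B =====
-- right = sum(idx * weight for idx, weight in enumerate(weights))
def pvB_initRight (weights : List Int) : Int :=
  ((PySem.List.enumerate weights).map (fun q => q.1 * q.2)).sum

-- for i, w in enumerate(weights): if left == right: return i; prefix += w; left += prefix; right -= total - prefix
def pvB_go (total : Int) : List Int → Int → Int → Int → Int → Int
  | [], _i, _left, _right, _pfx => -1
  | w :: rest, i, left, right, pfx =>
    if left = right then i
    else pvB_go total rest (i + 1) (left + (pfx + w)) (right - (total - (pfx + w))) (pfx + w)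

def weights_equilibrium_alt (weights : List Int) : Int :=
  pvB_go weights.sum weights 0 0 (pvB_initRight weights) 0

-- ===== PRECONDITION & SPEC =====
def Spec_weights_equilibrium (weights : List Int) (out : Int) : Prop := out = weights_equilibrium_alt weights
instance (weights : List Int) (out : Int) : Decidable (Spec_weights_equilibrium weights out) := by unfold Spec_weights_equilibrium; infer_instance

-- ===== CLAIM (what is proved, stated in full; the proofs are below) =====
def Claim_equal_weights_equilibrium : Prop := ∀ (weights : List Int), Dom_weights_equilibrium weights → Spec_weights_equilibrium weights (weights_equilibrium weights)

-- ===== LEMMAS AND PROOFS =====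

-- Σ (c + k) * l_k : the weighted torque sum both programs compute in different ways
def Tg (l : List Int) (c : Int) : Int :=
  ((PySem.List.enumerate l c).map (fun q => q.1 * q.2)).sum

lemma enumerate_shift (l : List Int) (s : Int) :
    PySem.List.enumerate l (s + 1) = (PySem.List.enumerate l s).map (fun q => (q.1 + 1, q.2)) := by
  induction l generalizing s with
  | nil => simp [PySem.List.enumerate_nil]
  | cons w t ih =>
    simp [PySem.List.enumerate_cons, ih (s + 1)]

lemma Tg_cons (w : Int) (l : List Int) (c : Int) :
    Tg (w :: l) c = c * w + Tg l (c + 1) := by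
  simp [Tg, PySem.List.enumerate_cons]

lemma Tg_shift (l : List Int) (c : Int) :
    Tg l (c + 1) = Tg l c + l.sum := by
  induction l generalizing c with
  | nil => simp [Tg, PySem.List.enumerate_nil]
  | cons w t ih =>
    rw [Tg_cons, Tg_cons, ih (c + 1)]
    simp [List.sum_cons]
    ring

-- Σ (c - k) * l_k : the shape of A's left sum
def Vg (l : List Int) (c : Int) : Int :=
  ((PySem.List.enumerate l).map (fun q => (c - q.1) * q.2)).sum

lemma Vg_cons (w : Int) (l : List Int) (c : Int) :
    Vg (w :: l) c = c * w + Vg l (c - 1) := by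
  simp only [Vg, PySem.List.enumerate_cons, enumerate_shift]
  simp only [List.map_map, List.map_cons, List.sum_cons, Function.comp_def]
  rw [List.map_congr_left (l := PySem.List.enumerate l 0)
    (g := fun q : Int × Int => (c - 1 - q.1) * q.2) (fun a _ => by ring)]
  ring

lemma Tg_append_singleton (l : List Int) (w c : Int) :
    Tg (l ++ [w]) c = Tg l c + (c + l.length) * w := by
  induction l generalizing c with
  | nil => simp [Tg, PySem.List.enumerate_nil, PySem.List.enumerate_cons]
  | cons x t ih =>
    rw [List.cons_append, Tg_cons, Tg_cons, ih (c + 1)]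
    simp only [List.length_cons]
    push_cast
    ring

lemma Vg_eq_Tg_reverse (p : List Int) :
    Vg p (p.length : Int) = Tg p.reverse 1 := by
  induction p with
  | nil => simp [Vg, Tg, PySem.List.enumerate_nil]
  | cons w t ih =>
    rw [List.reverse_cons, Tg_append_singleton, ← ih]
    rw [show ((((w :: t).length : Nat) : Int)) = (t.length : Int) + 1 by
        simp [List.length_cons], Vg_cons]
    simp
    ring

lemma shifted_sum_eq_Tg_one (l : List Int) :
    ((PySem.List.enumerate l).map (fun q => (q.1 + 1) * q.2)).sum = Tg l 1 := by
  rw [Tg, show (1 : Int) = 0 + 1 by ring, enumerate_shift, List.map_map]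
  exact congrArg List.sum (List.map_congr_left (fun a _ => by simp)).symm

lemma A_left_eq (p s : List Int) :
    pvA_left (p ++ s) (p.length : Int) = Tg p.reverse 1 := by
  rw [pvA_left, PySem.List.slice_to_natCast, List.take_left, ← Vg_eq_Tg_reverse]
  rfl

lemma A_right_eq (p rest : List Int) (w : Int) :
    pvA_right (p ++ w :: rest) (p.length : Int) = Tg (w :: rest) 0 := by
  rw [pvA_right,
    show ((p.length : Int) + 1) = ((p.length + 1 : Nat) : Int) by push_cast; ring,
    PySem.List.slice_from_natCast,
    show p ++ w :: rest = (p ++ [w]) ++ rest by simp,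
    show p.length + 1 = (p ++ [w]).length by simp,
    List.drop_left, shifted_sum_eq_Tg_one, Tg_cons]
  ring

lemma main_loop (s : List Int) : ∀ (p : List Int),
    pvA_go (p ++ s) (PySem.List.pyRange (p.length : Int) (((p ++ s).length : Nat) : Int) 1)
      = pvB_go (p ++ s).sum s (p.length : Int) (Tg p.reverse 1) (Tg s 0) p.sum := by
  induction s with
  | nil =>
    intro p
    simp [pvB_go, PySem.List.pyRange_one_eq_nil, pvA_go]
  | cons w rest ih =>
    intro p
    have hlt : (p.length : Int) < (((p ++ w :: rest).length : Nat) : Int) := by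
      simp
    rw [PySem.List.pyRange_one_cons hlt]
    rw [pvA_go, A_left_eq p (w :: rest), A_right_eq p rest w, pvB_go]
    by_cases hc : Tg p.reverse 1 = Tg (w :: rest) 0
    · simp [hc]
    · simp only [hc, if_false]
      have key := ih (p ++ [w])
      rw [show (p ++ [w]) ++ rest = p ++ w :: rest by simp] at key
      have h1 : (((p ++ [w]).length : Nat) : Int) = (p.length : Int) + 1 := by simp
      have h2 : Tg (p ++ [w]).reverse 1 = Tg p.reverse 1 + (p.sum + w) := by
        rw [List.reverse_append, List.reverse_singleton, List.singleton_append, Tg_cons,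
          Tg_shift p.reverse 1]
        simp
        try ring
      have h3 : Tg rest 0 = Tg (w :: rest) 0 - ((p ++ w :: rest).sum - (p.sum + w)) := by
        rw [Tg_cons, show (0 : Int) + 1 = 0 + 1 by ring, Tg_shift rest 0]
        simp
        try ring
      have h4 : (p ++ [w]).sum = p.sum + w := by simp
      rw [h1, h2, h3, h4] at key
      exact key

-- ===== VERDICT (by name: the statement is the Claim_ definition above) =====
theorem weights_equilibrium_spec : Claim_equal_weights_equilibrium := by
  intro weights _
  show weights_equilibrium weights = weights_equilibrium_alt weights
  have h := main_loop weights []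
  simp only [List.nil_append, List.length_nil, Nat.cast_zero, List.sum_nil] at h
  rw [weights_equilibrium, weights_equilibrium_alt]
  rw [show Tg [].reverse 1 = 0 by simp [Tg, PySem.List.enumerate_nil]] at h
  rw [show pvB_initRight weights = Tg weights 0 from rfl]
  exact h
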